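-- pv_equiv track=rewrite | github.com/griebels/reocr-project | align_sent/sent_match_lev_algo.py | hone_by_average_length
-- ===== SOURCE A (Python) =====
-- def hone_by_average_length(
--     hsent: str,
--     gsent: str,
--     matched_sentence: str,
--     anchor_chars: int = 5,
-- ):
--     """
--     Produce a shorter span from matched_sentence:
--       - find an anchor (first 5 characters of hsent) in a newline-stripped copy
--       - take avg_len characters, where avg_len = avg(len(hsent), len(gsent))
--       - starting with anchor, take all characters up to avg_len
--       - map back to original indices (preserving newlines)
--       - extend to a word boundary (so it doesn't stop in the middle of a word).
--     """
--     if not isinstance(hsent, str) or not isinstance(gsent, str) or not isinstance(matched_sentence, str):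
--         return None
--
--     hsent_strip = hsent.strip()
--     gsent_strip = gsent.strip()
--     if not hsent_strip or not gsent_strip or not matched_sentence:
--         return None
--
--     original_ms = matched_sentence
--
--     # Build newline-free search string + index map back to original
--     search_chars = []
--     idx_map = []  # idx_map[i] -> index in original_ms
--     for i, ch in enumerate(original_ms):
--         if ch in ("\n", "\r"):
--             continue
--         search_chars.append(ch)
--         idx_map.append(i)
--
--     search_ms = "".join(search_chars)
--     if not search_ms:
--         return None
--
--     anchor = hsent_strip if len(hsent_strip) < anchor_chars else hsent_strip[:anchor_chars]
--     start_s = search_ms.lower().find(anchor.lower())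
--     if start_s == -1:
--         return None
--
--     avg_len = int(round((len(hsent_strip) + len(gsent_strip)) / 2))
--     if avg_len <= 0:
--         return None
--
--     end_s = min(len(search_ms), start_s + avg_len)
--     if end_s <= start_s:
--         return None
--
--     # Map back to original indices
--     start_orig = idx_map[start_s]
--     end_orig = idx_map[end_s - 1] + 1  # exclusive
--
--     # Extend to word boundary in ORIGINAL
--     while end_orig < len(original_ms):
--         ch = original_ms[end_orig]
--         if ch.isspace() or ch in ".,;:!?)]}\"'":
--             break
--         end_orig += 1
--
--     return original_ms[start_orig:end_orig]
-- ===== SOURCE B (Python) =====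
-- def hone_by_average_length(
--     hsent: str,
--     gsent: str,
--     matched_sentence: str,
--     anchor_chars: int = 5,
-- ):
--     """Shortened matched-sentence span around the anchor, word-aligned.
--
--     Works with a sparse list of newline positions: the newline-free search
--     string is a join of the kept characters, and a search-string offset is
--     converted back to an original index arithmetically, by shifting it past
--     every newline that precedes it (_to_original), instead of keeping a
--     dense per-character index map.
--     """
--     hs = hsent.strip()
--     gs = gsent.strip()
--     if not hs or not gs or not matched_sentence:
--         return None
--
--     search_ms = "".join(ch for ch in matched_sentence if ch not in "\n\r")
--     if not search_ms:
--         return None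
--
--     anchor = hs[:anchor_chars] if len(hs) >= anchor_chars else hs
--     start_s = search_ms.lower().find(anchor.lower())
--     if start_s == -1:
--         return None
--
--     avg_len = int(round((len(hs) + len(gs)) / 2))
--     if avg_len <= 0:
--         return None
--
--     end_s = min(len(search_ms), start_s + avg_len)
--     if end_s <= start_s:
--         return None
--
--     breaks = [i for i, ch in enumerate(matched_sentence) if ch in "\n\r"]
--     start_orig = _to_original(start_s, breaks)
--     end_orig = _to_original(end_s - 1, breaks) + 1
--
--     # push the cut to the first word boundary at or after end_orig
--     n = len(matched_sentence)
--     end_orig = next(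
--         (j for j in range(end_orig, n)
--          if matched_sentence[j].isspace() or matched_sentence[j] in ".,;:!?)]}\"'"),
--         n,
--     )
--
--     return matched_sentence[start_orig:end_orig]
--
--
-- def _to_original(k, breaks):
--     """Original index of the k-th non-newline character: k shifted one place
--     to the right for each newline position that lands at or before it."""
--     for j, p in enumerate(breaks):
--         if p > k + j:
--             return k + j
--     return k + len(breaks)
-- ===== Notes on version B (the rewrite author's own statement) =====
-- stated objective: alternative
-- what changed: A builds a dense per-character index map alongside the search characters in one enumerate loop and maps span offsets back by list indexing; B builds only a sparse list of newline positions and converts a search-string offset back to an original index arithmetically, shifting it past each preceding newline (the search string is a plain filter-join and the word-boundary while loop becomes a first-boundary search over the suffix).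
import Mathlib
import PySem

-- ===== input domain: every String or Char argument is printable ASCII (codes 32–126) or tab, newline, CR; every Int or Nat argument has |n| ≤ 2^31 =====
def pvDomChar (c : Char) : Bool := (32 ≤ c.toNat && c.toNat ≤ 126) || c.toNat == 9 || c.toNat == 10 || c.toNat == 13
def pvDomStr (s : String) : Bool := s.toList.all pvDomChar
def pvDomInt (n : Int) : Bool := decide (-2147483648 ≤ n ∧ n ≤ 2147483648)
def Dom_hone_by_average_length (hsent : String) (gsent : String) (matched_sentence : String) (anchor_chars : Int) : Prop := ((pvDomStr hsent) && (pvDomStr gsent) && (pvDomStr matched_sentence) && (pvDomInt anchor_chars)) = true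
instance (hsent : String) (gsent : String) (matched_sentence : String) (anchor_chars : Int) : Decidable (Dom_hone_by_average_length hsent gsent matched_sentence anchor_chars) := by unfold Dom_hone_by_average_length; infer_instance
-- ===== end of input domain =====

-- B replaces A's dense per-character index map by a sparse list of newline positions:
-- a search offset is mapped back to an original index arithmetically, shifted past each
-- preceding newline; objective: an alternative data structure of the same asymptotic cost.

-- ===== PORT A =====

-- the `while end_orig < len(original_ms): ... end_orig += 1` word-boundary loop
def pvExtendA (ms : List Char) (e : Nat) : Nat :=
  if h : e < ms.length then
    let ch := ms[e]
    if PySem.Chars.isspace ch || PySem.Chars.isIn [ch] ".,;:!?)]}\"'".toList then e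
    else pvExtendA ms (e + 1)
  else e
termination_by ms.length - e

def hone_by_average_length (hsent : String) (gsent : String) (matched_sentence : String) (anchor_chars : Int) : Option String :=
  let hs := PySem.Chars.strip hsent.toList
  let gs := PySem.Chars.strip gsent.toList
  let ms := matched_sentence.toList
  if hs.isEmpty || gs.isEmpty || ms.isEmpty then none
  else
    -- for i, ch in enumerate(original_ms): build search_chars and idx_map
    let pairs := (PySem.List.enumerate ms 0).foldl
      (fun (acc : List Char × List Int) p =>
        if p.2 == '\n' || p.2 == '\r' then acc else (acc.1 ++ [p.2], acc.2 ++ [p.1]))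
      ([], [])
    let searchMs := pairs.1
    let idxMap := pairs.2
    if searchMs.isEmpty then none
    else
      let anchor := if (hs.length : Int) < anchor_chars then hs
                    else PySem.Chars.slice hs none (some anchor_chars)
      let start_s := PySem.Chars.find (PySem.Chars.lower searchMs) (PySem.Chars.lower anchor)
      if start_s = -1 then none
      else
        -- int(round((lh+lg)/2)): (lh+lg)/2 is an exact dyadic float, so Python's
        -- round is exact round-half-to-even — ported as that integer function
        let s : Int := (hs.length : Int) + (gs.length : Int)
        let half := PySem.Int.floordiv s 2
        let avg_len := if PySem.Int.mod s 2 = 0 then half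
                       else if PySem.Int.mod half 2 = 0 then half else half + 1
        if avg_len ≤ 0 then none
        else
          let end_s := min (searchMs.length : Int) (start_s + avg_len)
          if end_s ≤ start_s then none
          else
            match PySem.List.pyGet? idxMap start_s, PySem.List.pyGet? idxMap (end_s - 1) with
            | some so, some eo =>
                let end_orig := pvExtendA ms (eo + 1).toNat
                some (String.ofList (PySem.Chars.slice ms (some so) (some (end_orig : Int))))
            | _, _ => none  -- unreachable: a successful find keeps both indices in range

-- ===== PORT B =====

-- _to_original(k, breaks): for j, p in enumerate(breaks): if p > k + j: return k + j
def pvToOrig (k : Int) (breaks : List Int) (j : Int) : Int :=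
  match breaks with
  | [] => k + j
  | p :: rest => if p > k + j then k + j else pvToOrig k rest (j + 1)

-- Source B's next((j for j in range(e, n) if boundary), n): scan the suffix for the
-- first boundary character, j tracking the original index
def pvFindBoundary (l : List Char) (j : Nat) : Nat :=
  match l with
  | [] => j
  | ch :: rest =>
      if PySem.Chars.isspace ch || PySem.Chars.isIn [ch] ".,;:!?)]}\"'".toList then j
      else pvFindBoundary rest (j + 1)

def hone_by_average_length_alt (hsent : String) (gsent : String) (matched_sentence : String) (anchor_chars : Int) : Option String :=
  let hs := PySem.Chars.strip hsent.toList
  let gs := PySem.Chars.strip gsent.toList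
  let ms := matched_sentence.toList
  if hs.isEmpty || gs.isEmpty || ms.isEmpty then none
  else
    let searchMs := ms.filter (fun ch => !(PySem.Chars.isIn [ch] ['\n', '\r']))
    if searchMs.isEmpty then none
    else
      let anchor := if anchor_chars ≤ (hs.length : Int) then PySem.Chars.slice hs none (some anchor_chars)
                    else hs
      let start_s := PySem.Chars.find (PySem.Chars.lower searchMs) (PySem.Chars.lower anchor)
      if start_s = -1 then none
      else
        let s : Int := (hs.length : Int) + (gs.length : Int)
        let half := PySem.Int.floordiv s 2
        let avg_len := if PySem.Int.mod s 2 = 0 then half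
                       else if PySem.Int.mod half 2 = 0 then half else half + 1
        if avg_len ≤ 0 then none
        else
          let end_s := min (searchMs.length : Int) (start_s + avg_len)
          if end_s ≤ start_s then none
          else
            let breaks := ((PySem.List.enumerate ms 0).filter
              (fun p => PySem.Chars.isIn [p.2] ['\n', '\r'])).map (fun p => p.1)
            let start_orig := pvToOrig start_s breaks 0
            let end_orig0 := pvToOrig (end_s - 1) breaks 0 + 1
            let end_orig := pvFindBoundary (ms.drop end_orig0.toNat) end_orig0.toNat
            some (String.ofList (PySem.Chars.slice ms (some start_orig) (some (end_orig : Int))))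

-- ===== PRECONDITION & SPEC =====
def Spec_hone_by_average_length (hsent : String) (gsent : String) (matched_sentence : String) (anchor_chars : Int) (out : Option String) : Prop := out = hone_by_average_length_alt hsent gsent matched_sentence anchor_chars
instance (hsent : String) (gsent : String) (matched_sentence : String) (anchor_chars : Int) (out : Option String) : Decidable (Spec_hone_by_average_length hsent gsent matched_sentence anchor_chars out) := by unfold Spec_hone_by_average_length; infer_instance

-- ===== CLAIM (what is proved, stated in full; the proofs are below) =====
def Claim_equal_hone_by_average_length : Prop := ∀ (hsent : String) (gsent : String) (matched_sentence : String) (anchor_chars : Int), Dom_hone_by_average_length hsent gsent matched_sentence anchor_chars → Spec_hone_by_average_length hsent gsent matched_sentence anchor_chars (hone_by_average_length hsent gsent matched_sentence anchor_chars)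

-- ===== LEMMAS AND PROOFS =====

-- `ch in "\n\r"` (substring test of a single char) is just equality with one of them
lemma pvIsIn_pair (ch : Char) :
    PySem.Chars.isIn [ch] ['\n', '\r'] = (ch == '\n' || ch == '\r') := by
  rw [Bool.eq_iff_iff, PySem.Chars.isIn_iff_infix, List.singleton_infix_iff]
  simp

-- indices (from start s) of the non-newline chars of l — what A's idx_map holds
def pvIdx (l : List Char) (s : Int) : List Int :=
  match l with
  | [] => []
  | ch :: rest => if ch == '\n' || ch == '\r' then pvIdx rest (s + 1) else s :: pvIdx rest (s + 1)

-- indices (from start s) of the newline chars of l — what B's breaks holds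
def pvNlIdx (l : List Char) (s : Int) : List Int :=
  match l with
  | [] => []
  | ch :: rest => if ch == '\n' || ch == '\r' then s :: pvNlIdx rest (s + 1) else pvNlIdx rest (s + 1)

lemma pvFoldl_enum (l : List Char) (s : Int) (acc : List Char × List Int) :
    (PySem.List.enumerate l s).foldl
      (fun (acc : List Char × List Int) p =>
        if p.2 == '\n' || p.2 == '\r' then acc else (acc.1 ++ [p.2], acc.2 ++ [p.1])) acc
    = (acc.1 ++ l.filter (fun ch => !(ch == '\n' || ch == '\r')), acc.2 ++ pvIdx l s) := by
  induction l generalizing s acc with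
  | nil => simp [PySem.List.enumerate_nil, pvIdx]
  | cons ch rest ih =>
      rw [PySem.List.enumerate_cons]
      simp only [List.foldl_cons, ih, pvIdx]
      by_cases h : (ch == '\n' || ch == '\r') = true <;> simp [h, List.filter_cons] <;> simp at h <;> tauto

lemma pvBreaks_eq (l : List Char) (s : Int) :
    ((PySem.List.enumerate l s).filter (fun p => PySem.Chars.isIn [p.2] ['\n', '\r'])).map
      (fun p => p.1) = pvNlIdx l s := by
  induction l generalizing s with
  | nil => simp [PySem.List.enumerate_nil, pvNlIdx]
  | cons ch rest ih =>
      simp only [pvIsIn_pair] at ih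
      rw [PySem.List.enumerate_cons]
      simp only [List.filter_cons, pvNlIdx, pvIsIn_pair]
      by_cases h : (ch == '\n' || ch == '\r') = true <;>
        simp only [h, if_pos, if_false, Bool.false_eq_true, List.map_cons, ih]

-- pvToOrig depends on k and j only through k + j
def pvF (m : Int) (breaks : List Int) : Int :=
  match breaks with
  | [] => m
  | p :: rest => if p > m then m else pvF (m + 1) rest

lemma pvToOrig_eq_pvF (breaks : List Int) (k j : Int) :
    pvToOrig k breaks j = pvF (k + j) breaks := by
  induction breaks generalizing j with
  | nil => simp [pvToOrig, pvF]
  | cons p rest ih =>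
      simp only [pvToOrig, pvF, ih]
      have : k + (j + 1) = k + j + 1 := by ring
      rw [this]

lemma pvNlIdx_lb (l : List Char) (s : Int) : ∀ x ∈ pvNlIdx l s, s ≤ x := by
  induction l generalizing s with
  | nil => simp [pvNlIdx]
  | cons ch rest ih =>
      intro x hx
      simp only [pvNlIdx] at hx
      by_cases h : (ch == '\n' || ch == '\r') = true
      · rw [if_pos h] at hx
        rcases List.mem_cons.mp hx with h1 | h1
        · omega
        · have := ih (s + 1) x h1; omega
      · rw [if_neg h] at hx
        have := ih (s + 1) x hx; omega

lemma pvF_of_gt (m : Int) (breaks : List Int) (h : ∀ x ∈ breaks, m < x) : pvF m breaks = m := by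
  cases breaks with
  | nil => rfl
  | cons p rest => exact if_pos (h p (List.mem_cons_self))

-- the arithmetic mapping agrees with the dense index map
lemma pvF_spec (l : List Char) : ∀ (s k : Int), 0 ≤ k →
    ∀ (hk : k.toNat < (pvIdx l s).length),
    pvF (k + s) (pvNlIdx l s) = (pvIdx l s)[k.toNat] := by
  induction l with
  | nil => intro s k _ hk; simp [pvIdx] at hk
  | cons ch rest ih =>
      intro s k hk0 hk
      by_cases h : (ch == '\n' || ch == '\r') = true
      · simp only [pvIdx, pvNlIdx, if_pos h] at hk ⊢
        rw [pvF, if_neg (by omega)]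
        have heq : k + s + 1 = k + (s + 1) := by ring
        rw [heq]
        exact ih (s + 1) k hk0 hk
      · simp only [pvIdx, pvNlIdx, if_neg h] at hk ⊢
        by_cases hk1 : k = 0
        · subst hk1
          have hb : pvF (0 + s) (pvNlIdx rest (s + 1)) = 0 + s :=
            pvF_of_gt _ _ (fun x hx => by have := pvNlIdx_lb rest (s + 1) x hx; omega)
          rw [hb]
          simp
        · have hk2 : 1 ≤ k := by omega
          have ht : k.toNat = (k - 1).toNat + 1 := by omega
          have hlen : (k - 1).toNat < (pvIdx rest (s + 1)).length := by
            simp only [List.length_cons] at hk; omega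
          have hIH := ih (s + 1) (k - 1) (by omega) hlen
          have heq : (k - 1) + (s + 1) = k + s := by ring
          rw [heq] at hIH
          simp only [ht, List.getElem_cons_succ]
          exact hIH

lemma length_pvIdx (l : List Char) (s : Int) :
    (pvIdx l s).length = (l.filter (fun ch => !(ch == '\n' || ch == '\r'))).length := by
  induction l generalizing s with
  | nil => simp [pvIdx]
  | cons ch rest ih =>
      simp only [pvIdx, List.filter_cons]
      by_cases h : (ch == '\n' || ch == '\r') = true <;> simp [h, ih]

lemma pvLower_length (l : List Char) : (PySem.Chars.lower l).length = l.length := by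
  simp [PySem.Chars.lower]

lemma pvExtend_eq (ms : List Char) (e : Nat) :
    pvExtendA ms e = pvFindBoundary (ms.drop e) e := by
  fun_induction pvExtendA ms e with
  | case1 e h ch hb =>
      rw [List.drop_eq_getElem_cons h, pvFindBoundary, if_pos hb]
  | case2 e h ch hb ih =>
      rw [List.drop_eq_getElem_cons h, pvFindBoundary, if_neg hb]; exact ih
  | case3 e h =>
      rw [List.drop_of_length_le (by omega), pvFindBoundary]

-- ===== VERDICT (by name: the statement is the Claim_ definition above) =====
theorem hone_by_average_length_spec : Claim_equal_hone_by_average_length := by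
  intro hsent gsent matched_sentence anchor_chars _
  unfold Spec_hone_by_average_length hone_by_average_length hone_by_average_length_alt
  simp only [pvFoldl_enum, pvBreaks_eq, List.nil_append]
  set hs := PySem.Chars.strip hsent.toList
  set gs := PySem.Chars.strip gsent.toList
  set ms := matched_sentence.toList
  by_cases h0 : (hs.isEmpty || gs.isEmpty || ms.isEmpty) = true
  · simp [h0]
  · simp only [h0, Bool.false_eq_true, if_false]
    simp only [pvIsIn_pair]
    set search := ms.filter (fun ch => !(ch == '\n' || ch == '\r')) with hsearch
    by_cases h1 : search.isEmpty = true
    · simp [h1]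
    · simp only [h1, Bool.false_eq_true, if_false]
      -- the two ports spell the anchor conditional with opposite branches
      have hanchor_eq :
          (if anchor_chars ≤ (hs.length : Int) then PySem.Chars.slice hs none (some anchor_chars) else hs)
          = (if (hs.length : Int) < anchor_chars then hs else PySem.Chars.slice hs none (some anchor_chars)) := by
        by_cases hc : (hs.length : Int) < anchor_chars
        · rw [if_neg (by omega), if_pos hc]
        · rw [if_pos (by omega), if_neg hc]
      rw [hanchor_eq]
      set anchor := if (hs.length : Int) < anchor_chars then hs
                    else PySem.Chars.slice hs none (some anchor_chars) with hanchor
      set start_s := PySem.Chars.find (PySem.Chars.lower search) (PySem.Chars.lower anchor) with hstart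
      by_cases h2 : start_s = -1
      · simp [h2]
      · simp only [h2, if_false]
        have hss : 0 ≤ start_s := by
          have := PySem.Chars.neg_one_le_find (PySem.Chars.lower search) (PySem.Chars.lower anchor)
          rw [← hstart] at this; omega
        -- start_s is a valid index into the search string
        have hne : search ≠ [] := by simpa using h1
        have hsearch_pos : 0 < search.length := List.length_pos_of_ne_nil hne
        have hstart_lt : start_s.toNat < search.length := by
          by_cases hae : PySem.Chars.lower anchor = []
          · have : start_s = 0 := by rw [hstart, hae, PySem.Chars.find_nil]
            omega
          · have hpre := (PySem.Chars.find_spec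
              (show 0 ≤ PySem.Chars.find (PySem.Chars.lower search) (PySem.Chars.lower anchor) by
                rw [← hstart]; exact hss)).1
            rw [← hstart] at hpre
            have hd : ((PySem.Chars.lower search).drop start_s.toNat) ≠ [] := by
              intro hnil
              rw [hnil] at hpre
              exact hae (List.prefix_nil.mp hpre)
            have hlt : start_s.toNat < (PySem.Chars.lower search).length := by
              by_contra hle
              exact hd (List.drop_eq_nil_of_le (by omega))
            rw [pvLower_length] at hlt
            exact hlt
        set half := PySem.Int.floordiv ((hs.length : Int) + (gs.length : Int)) 2 with hhalf
        set avg_len := if PySem.Int.mod ((hs.length : Int) + (gs.length : Int)) 2 = 0 then half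
                       else if PySem.Int.mod half 2 = 0 then half else half + 1 with havg
        by_cases h3 : avg_len ≤ 0
        · simp [h3]
        · simp only [h3, if_false]
          set end_s := min (search.length : Int) (start_s + avg_len) with hend
          by_cases h4 : end_s ≤ start_s
          · simp [h4]
          · simp only [h4, if_false]
            have hend_lt : (end_s - 1).toNat < search.length := by
              have h5 : end_s ≤ (search.length : Int) := by rw [hend]; omega
              omega
            have hlenIdx : (pvIdx ms 0).length = search.length := by
              rw [length_pvIdx, hsearch]
            -- A's two list lookups succeed and equal B's arithmetic mapping
            have hget1 : PySem.List.pyGet? (pvIdx ms 0) start_s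
                = some (pvToOrig start_s (pvNlIdx ms 0) 0) := by
              rw [PySem.List.pyGet?_of_nonneg _ hss,
                  List.getElem?_eq_getElem (by omega),
                  pvToOrig_eq_pvF, pvF_spec ms 0 start_s hss (by omega)]
            have hget2 : PySem.List.pyGet? (pvIdx ms 0) (end_s - 1)
                = some (pvToOrig (end_s - 1) (pvNlIdx ms 0) 0) := by
              rw [PySem.List.pyGet?_of_nonneg _ (by omega),
                  List.getElem?_eq_getElem (by omega),
                  pvToOrig_eq_pvF, pvF_spec ms 0 (end_s - 1) (by omega) (by omega)]
            rw [hget1, hget2]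
            simp [pvExtend_eq]
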